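-- pv_equiv track=rewrite | github.com/sudiptap/algods | ds_algo/patterns/dynamic_programming/15_counting_combinatorial/solutions/3699-number-of-zigzag-arrays-i.py | numberOfZigZagArrays
-- ===== SOURCE A (Python) =====
-- MOD = 10**9 + 7
--
-- def numberOfZigZagArrays(n: int, k: int) -> int:
--     # Count zigzag permutations of [1..n].
--     # k might indicate the starting direction or number of peaks.
--     # Assuming k=0 means up-down (a[0]<a[1]>a[2]<...)
--     # and k=1 means down-up (a[0]>a[1]<a[2]>...)
--
--     # Euler zigzag numbers E(n):
--     # E(1)=1, E(2)=1, E(3)=1, E(4)=2, E(5)=5, ...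
--     # Actually: alternating permutations of n elements = A(n)
--     # A(1)=1, A(2)=1, A(3)=2, A(4)=5, A(5)=16, A(6)=61
--
--     # Using the recurrence: A(n) = sum over i of C(n-1, i) * A(i) * A(n-1-i)
--     # Or use the tangent/secant number approach.
--
--     # Simpler DP: T[n] = number of up-down alternating perms of {1,...,n}
--     # T[0]=1, T[1]=1
--     # Using: T[n] = T[n-1] * n // something... Actually:
--
--     # Let's use the "entringer numbers" E(n,k):
--     # E(n,0) = 0 for n>0, E(0,0) = 1
--     # E(n,k) = E(n,k-1) + E(n-1,n-k)
--     # A(n) = E(n, n) for alternating perms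
--
--     # But this might not match the problem exactly. Let me compute directly.
--
--     if n <= 0:
--         return 0
--
--     # Compute using Entringer numbers
--     E = [[0] * (n + 1) for _ in range(n + 1)]
--     E[0][0] = 1
--
--     for i in range(1, n + 1):
--         E[i][0] = 0
--         for j in range(1, i + 1):
--             E[i][j] = (E[i][j - 1] + E[i - 1][i - j]) % MOD
--
--     # E[n][n] = number of alternating permutations
--     # For up-down starting: A_up(n) = E[n][n] when n is odd contributes to up-start
--     # Total alternating perms (both up-down and down-up) = 2 * E[n][n] for n >= 2
--
--     return E[n][n] % MOD
-- ===== SOURCE B (Python) =====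
-- MOD = 10**9 + 7
--
-- def numberOfZigZagArrays(n: int, k: int) -> int:
--     # Binomial-convolution recurrence for the zigzag numbers:
--     #   2*Z[m+1] = sum_{j=0..m} C(m,j) * Z[j] * Z[m-j]   for m >= 1,
--     # with Z[0] = Z[1] = 1.  C(m,.) is maintained as a Pascal row and the
--     # division by 2 is done with inv2, the inverse of 2 modulo the odd prime MOD.
--     if n <= 0:
--         return 0
--     inv2 = (MOD + 1) // 2
--     z = [1, 1]
--     row = [1]  # Pascal row C(m-1, .)
--     for m in range(1, n):
--         row = [1] + [(row[i] + row[i + 1]) % MOD for i in range(m - 1)] + [1]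
--         s = 0
--         for j in range(m + 1):
--             s = (s + row[j] * z[j] * z[m - j]) % MOD
--         z.append(s * inv2 % MOD)
--     return z[n] % MOD
-- ===== Notes on version B (the rewrite author's own statement) =====
-- stated objective: alternative
-- what changed: Replaces the Entringer-triangle additive recurrence E[i][j]=E[i][j-1]+E[i-1][i-j] by a completely different characterization of the zigzag numbers: the quadratic binomial-convolution recurrence 2*Z[m+1]=sum_j C(m,j)*Z[j]*Z[m-j], evaluated mod p with a maintained Pascal row and the modular inverse of 2.
import Mathlib
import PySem

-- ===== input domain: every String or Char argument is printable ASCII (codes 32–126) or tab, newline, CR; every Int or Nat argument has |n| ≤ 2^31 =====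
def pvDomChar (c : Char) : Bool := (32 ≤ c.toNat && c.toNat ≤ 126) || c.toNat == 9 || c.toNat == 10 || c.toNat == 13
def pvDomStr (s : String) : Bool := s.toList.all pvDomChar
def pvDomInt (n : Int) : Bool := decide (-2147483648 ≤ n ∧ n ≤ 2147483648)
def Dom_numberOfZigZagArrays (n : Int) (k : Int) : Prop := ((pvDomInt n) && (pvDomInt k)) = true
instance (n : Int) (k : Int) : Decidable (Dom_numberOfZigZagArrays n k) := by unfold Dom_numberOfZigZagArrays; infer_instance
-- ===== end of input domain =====

-- B replaces A's Entringer-triangle recurrence E[i][j]=E[i][j-1]+E[i-1][i-j] by a different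
-- characterization of the zigzag numbers: the binomial-convolution recurrence
-- 2*Z[m+1] = sum_j C(m,j)*Z[j]*Z[m-j], evaluated mod p with a Pascal row and the inverse of 2.

-- ===== PORT A =====
-- matrix read E[i][j] (indices always in range in A)
def pvMget (E : List (List Int)) (i j : Nat) : Int := (E.getD i []).getD j 0
-- matrix write E[i][j] = v
def pvMset (E : List (List Int)) (i j : Nat) (v : Int) : List (List Int) :=
  E.set i ((E.getD i []).set j v)

def numberOfZigZagArrays (n : Int) (k : Int) : Int :=
  if n ≤ 0 then 0
  else
    let N := n.toNat
    let E0 : List (List Int) := List.replicate (N + 1) (List.replicate (N + 1) (0 : Int))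
    let E1 := pvMset E0 0 0 1
    let EF := (List.range' 1 N).foldl (fun E i =>
        let E' := pvMset E i 0 0
        (List.range' 1 i).foldl (fun F j =>
          pvMset F i j
            (PySem.Int.mod (pvMget F i (j - 1) + pvMget F (i - 1) (i - j)) 1000000007)) E') E1
    PySem.Int.mod (pvMget EF N N) 1000000007

-- ===== PORT B =====
-- one outer iteration of Source B's loop: state (z, row); all list indices are in range in Source B,
-- so row[i], z[j] are ported as getD _ 0
def pvConvStep (p : List Int × List Int) (m : Nat) : List Int × List Int :=
  let row := [(1 : Int)] ++
      ((List.range (m - 1)).map fun i =>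
        PySem.Int.mod (p.2.getD i 0 + p.2.getD (i + 1) 0) 1000000007) ++ [(1 : Int)]
  let s := (List.range (m + 1)).foldl (fun s j =>
      PySem.Int.mod (s + row.getD j 0 * p.1.getD j 0 * p.1.getD (m - j) 0) 1000000007) 0
  (p.1 ++ [PySem.Int.mod (s * PySem.Int.floordiv (1000000007 + 1) 2) 1000000007], row)

def numberOfZigZagArrays_alt (n : Int) (k : Int) : Int :=
  if n ≤ 0 then 0
  else
    let st := (List.range' 1 (n.toNat - 1)).foldl pvConvStep ([1, 1], [1])
    PySem.Int.mod (st.1.getD n.toNat 0) 1000000007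

-- ===== PRECONDITION & SPEC =====
def Spec_numberOfZigZagArrays (n : Int) (k : Int) (out : Int) : Prop := out = numberOfZigZagArrays_alt n k
instance (n : Int) (k : Int) (out : Int) : Decidable (Spec_numberOfZigZagArrays n k out) := by unfold Spec_numberOfZigZagArrays; infer_instance

-- ===== CLAIM (what is proved, stated in full; the proofs are below) =====
def Claim_equal_numberOfZigZagArrays : Prop := ∀ (n : Int) (k : Int), Dom_numberOfZigZagArrays n k → Spec_numberOfZigZagArrays n k (numberOfZigZagArrays n k)

-- ===== LEMMAS AND PROOFS =====

-- The Entringer numbers (E 0 k = 1 for every k; beyond the triangle the values are unused)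
def Ent : Nat → Nat → Nat
  | 0, _ => 1
  | _ + 1, 0 => 0
  | n + 1, k + 1 => Ent (n + 1) k + Ent n (n - k)
termination_by n k => (n, k)

theorem ent_succ_succ (n k : Nat) : Ent (n + 1) (k + 1) = Ent (n + 1) k + Ent n (n - k) := by
  rw [Ent]

-- ---------- the combinatorial identity: sum C(m,i) Z i Z (m-i) = 2 Z (m+1), Z n = Ent n n ----------

def fS (n k i : Nat) : Nat :=
  ∑ j ∈ Finset.range (i + 1), k.choose j * ((n - k).choose (i - j) * Ent (n - i) (k - j))

theorem ent_zero (k : Nat) : Ent 0 k = 1 := by rw [Ent]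

theorem ent_base (n : Nat) : Ent (n + 1) 0 = 0 := by rw [Ent]

theorem vand (a b m : Nat) :
    ∑ j ∈ Finset.range (m + 1), a.choose j * b.choose (m - j) = (a + b).choose m := by
  rw [Nat.add_choose_eq, Finset.Nat.sum_antidiagonal_eq_sum_range_succ_mk]

theorem fS_top (n K : Nat) (h : K ≤ n) : fS n K n = 1 := by
  unfold fS
  rw [Nat.sub_self]
  have h1 : ∀ j ∈ Finset.range (n + 1),
      K.choose j * ((n - K).choose (n - j) * Ent 0 (K - j)) = K.choose j * (n - K).choose (n - j) := by
    intro j _; rw [ent_zero]; ring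
  rw [Finset.sum_congr rfl h1, vand, Nat.add_sub_cancel' h, Nat.choose_self]

theorem fS_top' (n K : Nat) (h1 : 1 ≤ K) (h2 : K ≤ n) : fS (n - 1) (n - K) n = 0 := by
  unfold fS
  have e0 : n - 1 - n = 0 := by omega
  have e1 : n - 1 - (n - K) = K - 1 := by omega
  rw [e0, e1]
  have h3 : ∀ j ∈ Finset.range (n + 1),
      (n - K).choose j * ((K - 1).choose (n - j) * Ent 0 (n - K - j)) =
        (n - K).choose j * (K - 1).choose (n - j) := by
    intro j _; rw [ent_zero]; ring
  rw [Finset.sum_congr rfl h3, vand]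
  exact Nat.choose_eq_zero_of_lt (by omega)

theorem fS_rec (n K i : Nat) (hk : K + 1 ≤ n) (hi : i ≤ n) :
    fS n (K + 1) i = fS n K i + fS (n - 1) (n - (K + 1)) i := by
  by_cases hin : i = n
  · rw [hin, fS_top n (K + 1) hk, fS_top n K (by omega), fS_top' n (K + 1) (by omega) hk]
  have hilt : i < n := by omega
  set c := n - (K + 1) with hcdef
  have hc1 : n - K = c + 1 := by omega
  have hc2 : n - 1 - c = K := by omega
  set P := ∑ j ∈ Finset.range (i + 1), K.choose j * (c.choose (i - j) * Ent (n - i) (K - j)) with hP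
  set Q := ∑ j ∈ Finset.range (i + 1), K.choose j * (c.choose (i - j) * Ent (n - i) (K + 1 - j)) with hQ
  set R := ∑ j ∈ Finset.range i, K.choose j * (c.choose (i - 1 - j) * Ent (n - i) (K - j)) with hR
  have hS1 : fS n (K + 1) i = Q + R := by
    unfold fS
    rw [hQ, Finset.sum_range_succ', Finset.sum_range_succ']
    have e1 : ∀ j ∈ Finset.range i,
        (K + 1).choose (j + 1) * (c.choose (i - (j + 1)) * Ent (n - i) (K + 1 - (j + 1))) =
          K.choose (j + 1) * (c.choose (i - (j + 1)) * Ent (n - i) (K + 1 - (j + 1))) +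
            K.choose j * (c.choose (i - 1 - j) * Ent (n - i) (K - j)) := by
      intro j hj
      rw [Finset.mem_range] at hj
      have e2 : i - (j + 1) = i - 1 - j := by omega
      have e3 : K + 1 - (j + 1) = K - j := by omega
      rw [Nat.choose_succ_succ', e2, e3, add_mul]
      ring
    rw [Finset.sum_congr rfl e1, Finset.sum_add_distrib]
    simp only [Nat.choose_zero_right, one_mul, Nat.sub_zero]
    ring
  have hS2 : fS n K i = P + R := by
    unfold fS
    rw [hc1, hP, Finset.sum_range_succ, Finset.sum_range_succ]
    have e1 : ∀ j ∈ Finset.range i,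
        K.choose j * ((c + 1).choose (i - j) * Ent (n - i) (K - j)) =
          K.choose j * (c.choose (i - j) * Ent (n - i) (K - j)) +
            K.choose j * (c.choose (i - 1 - j) * Ent (n - i) (K - j)) := by
      intro j hj
      rw [Finset.mem_range] at hj
      have e2 : i - j = (i - 1 - j) + 1 := by omega
      rw [e2, Nat.choose_succ_succ]
      have e3 : i - 1 - j + 1 = i - j := by omega
      simp only [Nat.succ_eq_add_one, e3]
      ring
    rw [Finset.sum_congr rfl e1, Finset.sum_add_distrib]
    simp only [Nat.sub_self, Nat.choose_zero_right, one_mul]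
    ring
  have hS3 : Q = P + fS (n - 1) c i := by
    unfold fS
    rw [hc2]
    have hrefl : ∑ j ∈ Finset.range (i + 1),
        c.choose j * (K.choose (i - j) * Ent (n - 1 - i) (c - j)) =
        ∑ j ∈ Finset.range (i + 1),
          c.choose (i - j) * (K.choose j * Ent (n - 1 - i) (c - (i - j))) := by
      rw [← Finset.sum_range_reflect]
      apply Finset.sum_congr rfl
      intro j hj
      rw [Finset.mem_range] at hj
      have e1 : i + 1 - 1 - j = i - j := by omega
      have e2 : i - (i - j) = j := by omega
      rw [e1, e2]
    rw [hrefl, hQ, hP, ← Finset.sum_add_distrib]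
    apply Finset.sum_congr rfl
    intro j hj
    rw [Finset.mem_range] at hj
    by_cases hjK : j ≤ K
    · have en : n - i = (n - 1 - i) + 1 := by omega
      have ek : K + 1 - j = (K - j) + 1 := by omega
      rw [en, ek, ent_succ_succ]
      have e3 : n - 1 - i - (K - j) = c - (i - j) := by omega
      rw [e3]
      ring
    · rw [Nat.choose_eq_zero_of_lt (show K < j by omega)]
      ring
  rw [hS1, hS3, hS2]
  ring

theorem fS_zero (n i : Nat) (hi : i ≤ n) : fS n 0 i = if i = n then 1 else 0 := by
  unfold fS
  rw [Nat.sub_zero, Finset.sum_range_succ']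
  have h1 : ∀ j ∈ Finset.range i,
      Nat.choose 0 (j + 1) * (n.choose (i - (j + 1)) * Ent (n - i) (0 - (j + 1))) = 0 := by
    intro j _; rw [Nat.choose_eq_zero_of_lt (by omega)]; ring
  rw [Finset.sum_congr rfl h1, Finset.sum_const_zero]
  by_cases h : i = n
  · subst h; simp [ent_zero]
  · obtain ⟨t, ht⟩ : ∃ t, n - i = t + 1 := ⟨n - i - 1, by omega⟩
    simp [ht, ent_base, h]

theorem fS_diag (n i : Nat) : fS n n i = n.choose i * Ent (n - i) (n - i) := by
  unfold fS
  rw [Nat.sub_self, Finset.sum_range_succ]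
  have h1 : ∀ j ∈ Finset.range i,
      n.choose j * (Nat.choose 0 (i - j) * Ent (n - i) (n - j)) = 0 := by
    intro j hj
    rw [Finset.mem_range] at hj
    rw [Nat.choose_eq_zero_of_lt (show 0 < i - j by omega)]; ring
  rw [Finset.sum_congr rfl h1, Finset.sum_const_zero, Nat.sub_self, Nat.choose_zero_right]
  ring

theorem G_eq (n : Nat) : ∀ k, k ≤ n →
    ∑ i ∈ Finset.range (n + 1), Ent i i * fS n k i = Ent (n + 1) k + Ent (n + 1) (k + 1) := by
  induction n using Nat.strong_induction_on with
  | _ n ihn =>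
    intro k
    induction k with
    | zero =>
        intro _
        have h1 : ∀ i ∈ Finset.range (n + 1),
            Ent i i * fS n 0 i = if i = n then Ent n n else 0 := by
          intro i hi
          rw [Finset.mem_range] at hi
          rw [fS_zero n i (by omega)]
          by_cases h : i = n <;> simp [h]
        rw [Finset.sum_congr rfl h1, Finset.sum_ite_eq' (Finset.range (n + 1))]
        have h2 := ent_succ_succ n 0
        simp only [Nat.sub_zero] at h2
        simp [Finset.mem_range, h2, ent_base]
    | succ k ihk =>
        intro hk
        have hkn : k ≤ n := by omega
        have hn1 : 1 ≤ n := by omega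
        have hsplit : ∑ i ∈ Finset.range (n + 1), Ent i i * fS n (k + 1) i =
            (∑ i ∈ Finset.range (n + 1), Ent i i * fS n k i) +
              ∑ i ∈ Finset.range (n + 1), Ent i i * fS (n - 1) (n - (k + 1)) i := by
          rw [← Finset.sum_add_distrib]
          apply Finset.sum_congr rfl
          intro i hi
          rw [Finset.mem_range] at hi
          rw [fS_rec n k i hk (by omega)]
          ring
        rw [hsplit, ihk hkn]
        have hpeel : ∑ i ∈ Finset.range (n + 1), Ent i i * fS (n - 1) (n - (k + 1)) i =
            (∑ i ∈ Finset.range n, Ent i i * fS (n - 1) (n - (k + 1)) i) +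
              Ent n n * fS (n - 1) (n - (k + 1)) n := Finset.sum_range_succ _ n
        rw [hpeel, fS_top' n (k + 1) (by omega) hk, Nat.mul_zero, Nat.add_zero]
        have hrw : n = (n - 1) + 1 := by omega
        have hsum : ∑ i ∈ Finset.range n, Ent i i * fS (n - 1) (n - (k + 1)) i =
            Ent ((n - 1) + 1) (n - (k + 1)) + Ent ((n - 1) + 1) ((n - (k + 1)) + 1) := by
          rw [show (Finset.range n) = Finset.range ((n - 1) + 1) by rw [← hrw]]
          exact ihn (n - 1) (by omega) (n - (k + 1)) (by omega)
        rw [hsum, ← hrw]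
        have e1 := ent_succ_succ n k
        have e2 := ent_succ_succ n (k + 1)
        have e3 : n - (k + 1) + 1 = n - k := by omega
        rw [e3]
        omega

theorem conv_eq (m : Nat) (hm : 1 ≤ m) :
    ∑ i ∈ Finset.range (m + 1), m.choose i * (Ent i i * Ent (m - i) (m - i)) =
      2 * Ent (m + 1) (m + 1) := by
  have h1 : ∀ i ∈ Finset.range (m + 1),
      m.choose i * (Ent i i * Ent (m - i) (m - i)) = Ent i i * fS m m i := by
    intro i _
    rw [fS_diag]
    ring
  rw [Finset.sum_congr rfl h1, G_eq m m le_rfl]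
  have e1 := ent_succ_succ m m
  rw [Nat.sub_self] at e1
  obtain ⟨t, rfl⟩ : ∃ t, m = t + 1 := ⟨m - 1, by omega⟩
  have e2 := ent_base t
  omega

-- ---------- A-side: the matrix computes the Entringer triangle mod p ----------
-- (boustrophedon row view of A's triangle, then bridged to Ent)

def pvScan (a : Int) : List Int → List Int
  | [] => []
  | x :: xs =>
      let a' := PySem.Int.mod (a + x) 1000000007
      a' :: pvScan a' xs

def pvRow : Nat → List Int
  | 0 => [1]
  | i + 1 => 0 :: pvScan 0 (pvRow i).reverse

theorem pvScan_length (xs : List Int) : ∀ a, (pvScan a xs).length = xs.length := by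
  induction xs with
  | nil => intro a; rfl
  | cons x xs ih => intro a; simp [pvScan, ih]

theorem pvRow_length (i : Nat) : (pvRow i).length = i + 1 := by
  induction i with
  | zero => rfl
  | succ i ih => simp [pvRow, pvScan_length, ih]

theorem pvScan_getD (xs : List Int) : ∀ (a : Int) (j : Nat), j < xs.length →
    (a :: pvScan a xs).getD (j + 1) 0 =
      PySem.Int.mod ((a :: pvScan a xs).getD j 0 + xs.getD j 0) 1000000007 := by
  induction xs with
  | nil => intro a j h; simp at h
  | cons x xs ih =>
      intro a j h
      cases j with
      | zero => simp [pvScan]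
      | succ j =>
          simp only [pvScan, List.getD_cons_succ]
          exact ih _ j (by simpa using h)

theorem pvRow_getD_succ (i j : Nat) (h : j ≤ i) :
    (pvRow (i + 1)).getD (j + 1) 0 =
      PySem.Int.mod ((pvRow (i + 1)).getD j 0 + (pvRow i).getD (i - j) 0) 1000000007 := by
  have hlen : j < (pvRow i).reverse.length := by simp [pvRow_length]; omega
  have hrev : (pvRow i).reverse.getD j 0 = (pvRow i).getD (i - j) 0 := by
    rw [List.getD_eq_getElem _ _ hlen, List.getElem_reverse,
        List.getD_eq_getElem _ _ (by rw [pvRow_length]; omega)]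
    congr 1
    rw [pvRow_length]
    omega
  rw [show pvRow (i + 1) = 0 :: pvScan 0 (pvRow i).reverse from rfl,
      pvScan_getD _ 0 j hlen, hrev]

theorem pmod (x : Int) : PySem.Int.mod x 1000000007 = x % 1000000007 :=
  PySem.Int.mod_eq_emod_of_pos (by norm_num)

theorem modM_idem (x : Int) : x % 1000000007 % 1000000007 = x % 1000000007 :=
  Int.emod_emod_of_dvd _ dvd_rfl

-- bridge: pvRow holds the Entringer numbers mod p
theorem pvRow_ent (i : Nat) : ∀ j, j ≤ i →
    (pvRow i).getD j 0 = (Ent i j : Int) % 1000000007 := by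
  induction i with
  | zero =>
      intro j hj
      interval_cases j
      rw [ent_zero]
      decide
  | succ i ih =>
      intro j
      induction j with
      | zero =>
          intro _
          show (0 : Int) = _
          rw [ent_base]
          decide
      | succ j ihj =>
          intro hj
          rw [pvRow_getD_succ i j (by omega), ihj (by omega), ih (i - j) (by omega), pmod,
              ent_succ_succ]
          push_cast
          exact Int.ModEq.add (modM_idem _) (modM_idem _)

-- A-side matrix invariant after the first i outer iterations
def pvGood (N i : Nat) (M : List (List Int)) : Prop :=
  M.length = N + 1 ∧
  (∀ t, t ≤ N → (M.getD t []).length = N + 1) ∧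
  (∀ t, t ≤ i → M.getD t [] = pvRow t ++ List.replicate (N - t) 0) ∧
  (∀ t, i < t → t ≤ N → M.getD t [] = List.replicate (N + 1) 0)

theorem getD_pvMset_ne (M : List (List Int)) (i j : Nat) (v : Int) (t : Nat) (h : t ≠ i) :
    (pvMset M i j v).getD t [] = M.getD t [] := by
  simp [pvMset, List.getD_eq_getElem?_getD, List.getElem?_set_ne (Ne.symm h)]

theorem getD_pvMset_self (M : List (List Int)) (i j : Nat) (v : Int) (h : i < M.length) :
    (pvMset M i j v).getD i [] = (M.getD i []).set j v := by
  simp [pvMset, List.getD_eq_getElem?_getD, h]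

theorem getD_replicate_rows (N t : Nat) (r : List Int) (h : t ≤ N) :
    (List.replicate (N + 1) r).getD t [] = r := by
  simp [List.getD_eq_getElem?_getD, Nat.lt_succ_of_le h]

theorem pvGood_init (N : Nat) :
    pvGood N 0 (pvMset (List.replicate (N + 1) (List.replicate (N + 1) (0 : Int))) 0 0 1) := by
  have hlen0 : (0 : Nat) < (List.replicate (N + 1) (List.replicate (N + 1) (0 : Int))).length := by
    simp
  refine ⟨by simp [pvMset], ?_, ?_, ?_⟩
  · intro t ht
    rcases Nat.eq_zero_or_pos t with h0 | hpos
    · subst h0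
      rw [getD_pvMset_self _ _ _ _ hlen0, getD_replicate_rows _ _ _ (Nat.zero_le N)]
      simp
    · rw [getD_pvMset_ne _ _ _ _ _ (by omega), getD_replicate_rows _ _ _ ht]
      simp
  · intro t ht
    interval_cases t
    rw [getD_pvMset_self _ _ _ _ hlen0, getD_replicate_rows _ _ _ (Nat.zero_le N)]
    simp [pvRow, List.replicate_succ]
  · intro t ht htN
    rw [getD_pvMset_ne _ _ _ _ _ (by omega), getD_replicate_rows _ _ _ htN]

-- inner-loop invariant: row i holds the first j+1 entries of pvRow i
def pvInnerInv (N i j : Nat) (M : List (List Int)) : Prop :=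
  M.length = N + 1 ∧
  (∀ t, t ≤ N → (M.getD t []).length = N + 1) ∧
  (∀ t, t < i → M.getD t [] = pvRow t ++ List.replicate (N - t) 0) ∧
  (∀ t, i < t → t ≤ N → M.getD t [] = List.replicate (N + 1) 0) ∧
  M.getD i [] = (pvRow i).take (j + 1) ++ List.replicate (N - j) 0

theorem pvInner_start (N i : Nat) (hi1 : 1 ≤ i) (hiN : i ≤ N) (M : List (List Int))
    (h : pvGood N (i - 1) M) : pvInnerInv N i 0 (pvMset M i 0 0) := by
  obtain ⟨hL, hRL, hlt, hgt⟩ := h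
  have hiL : i < M.length := by omega
  have hrowi : M.getD i [] = List.replicate (N + 1) (0 : Int) := hgt i (by omega) hiN
  refine ⟨by simp [pvMset, hL], ?_, ?_, ?_, ?_⟩
  · intro t ht
    rcases eq_or_ne t i with h0 | hne
    · subst h0
      rw [getD_pvMset_self _ _ _ _ hiL, List.length_set]
      exact hRL _ ht
    · rw [getD_pvMset_ne _ _ _ _ _ hne]; exact hRL t ht
  · intro t ht
    rw [getD_pvMset_ne _ _ _ _ _ (by omega)]
    exact hlt t (by omega)
  · intro t ht htN
    rw [getD_pvMset_ne _ _ _ _ _ (by omega)]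
    exact hgt t (by omega) htN
  · rw [getD_pvMset_self _ _ _ _ hiL, hrowi]
    have : pvRow i = 0 :: pvScan 0 (pvRow (i - 1)).reverse := by
      have : pvRow ((i - 1) + 1) = 0 :: pvScan 0 (pvRow (i - 1)).reverse := rfl
      rwa [Nat.sub_add_cancel hi1] at this
    rw [this]
    simp [List.replicate_succ]

theorem pvInner_step (N i j : Nat) (h1 : j + 1 ≤ i) (hiN : i ≤ N) (M : List (List Int))
    (h : pvInnerInv N i j M) :
    pvInnerInv N i (j + 1)
      (pvMset M i (j + 1)
        (PySem.Int.mod (pvMget M i (j + 1 - 1) + pvMget M (i - 1) (i - (j + 1))) 1000000007)) := by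
  obtain ⟨hL, hRL, hlt, hgt, hrow⟩ := h
  have hiL : i < M.length := by omega
  have hjlt : j < (pvRow i).length := by rw [pvRow_length]; omega
  have hv0 : pvMget M i (j + 1 - 1) = (pvRow i).getD j 0 := by
    unfold pvMget
    rw [hrow]
    have hjt : j < ((pvRow i).take (j + 1)).length := by
      rw [List.length_take]; omega
    rw [Nat.add_sub_cancel, List.getD_append _ _ _ _ hjt,
        List.getD_eq_getElem _ _ hjt, List.getElem_take, List.getD_eq_getElem _ _ hjlt]
  have hv1 : pvMget M (i - 1) (i - (j + 1)) = (pvRow (i - 1)).getD (i - 1 - j) 0 := by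
    unfold pvMget
    rw [hlt (i - 1) (by omega)]
    have hx : i - (j + 1) < (pvRow (i - 1)).length := by rw [pvRow_length]; omega
    rw [List.getD_append _ _ _ _ hx]
    congr 1
    omega
  have hval : PySem.Int.mod (pvMget M i (j + 1 - 1) + pvMget M (i - 1) (i - (j + 1))) 1000000007
      = (pvRow i).getD (j + 1) 0 := by
    rw [hv0, hv1]
    have := pvRow_getD_succ (i - 1) j (by omega)
    rw [Nat.sub_add_cancel (by omega : 1 ≤ i)] at this
    exact this.symm
  refine ⟨by simp [pvMset, hL], ?_, ?_, ?_, ?_⟩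
  · intro t ht
    rcases eq_or_ne t i with h0 | hne
    · subst h0
      rw [getD_pvMset_self _ _ _ _ hiL, List.length_set]
      exact hRL _ ht
    · rw [getD_pvMset_ne _ _ _ _ _ hne]; exact hRL t ht
  · intro t ht
    rw [getD_pvMset_ne _ _ _ _ _ (by omega)]
    exact hlt t ht
  · intro t ht htN
    rw [getD_pvMset_ne _ _ _ _ _ (by omega)]
    exact hgt t ht htN
  · rw [getD_pvMset_self _ _ _ _ hiL, hrow, hval]
    have hlt1 : j + 1 < (pvRow i).length := by rw [pvRow_length]; omega
    have htl : ((pvRow i).take (j + 1)).length = j + 1 := by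
      rw [List.length_take]; omega
    rw [List.set_append_right _ _ (by omega)]
    rw [htl, Nat.sub_self]
    have hrep : List.replicate (N - j) (0 : Int) = 0 :: List.replicate (N - (j + 1)) 0 := by
      have : N - j = (N - (j + 1)) + 1 := by omega
      rw [this, List.replicate_succ]
    rw [hrep]
    simp only [List.set_cons_zero]
    have htake : (pvRow i).take (j + 1 + 1) = (pvRow i).take (j + 1) ++ [(pvRow i).getD (j + 1) 0] := by
      rw [List.take_add_one]
      rw [List.getElem?_eq_getElem hlt1]
      rw [List.getD_eq_getElem _ _ hlt1]
      rfl
    rw [htake]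
    simp

theorem pvInner_fold (N i : Nat) (hi1 : 1 ≤ i) (hiN : i ≤ N) (M : List (List Int))
    (h : pvGood N (i - 1) M) : ∀ jm, jm ≤ i →
    pvInnerInv N i jm ((List.range' 1 jm).foldl (fun F j =>
        pvMset F i j
          (PySem.Int.mod (pvMget F i (j - 1) + pvMget F (i - 1) (i - j)) 1000000007))
        (pvMset M i 0 0)) := by
  intro jm
  induction jm with
  | zero => intro _; exact pvInner_start N i hi1 hiN M h
  | succ jm ih =>
      intro hjm
      rw [List.range'_concat, List.foldl_append]
      have e : (1 : Nat) + 1 * jm = jm + 1 := by omega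
      rw [e]
      simp only [List.foldl_cons, List.foldl_nil]
      exact pvInner_step N i jm hjm hiN _ (ih (by omega))

theorem pvInner (N i : Nat) (hi1 : 1 ≤ i) (hiN : i ≤ N) (M : List (List Int))
    (h : pvGood N (i - 1) M) :
    pvGood N i ((List.range' 1 i).foldl (fun F j =>
        pvMset F i j
          (PySem.Int.mod (pvMget F i (j - 1) + pvMget F (i - 1) (i - j)) 1000000007))
        (pvMset M i 0 0)) := by
  obtain ⟨hL, hRL, hlt, hgt, hrow⟩ := pvInner_fold N i hi1 hiN M h i (le_refl i)
  refine ⟨hL, hRL, ?_, hgt⟩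
  intro t ht
  rcases eq_or_ne t i with h0 | hne
  · subst h0
    rw [hrow]
    congr 1
    apply List.take_of_length_le
    rw [pvRow_length]
  · exact hlt t (by omega)

theorem pvOuter (N : Nat) (m : Nat) (hm : m ≤ N) :
    pvGood N m ((List.range' 1 m).foldl (fun E i =>
        let E' := pvMset E i 0 0
        (List.range' 1 i).foldl (fun F j =>
          pvMset F i j
            (PySem.Int.mod (pvMget F i (j - 1) + pvMget F (i - 1) (i - j)) 1000000007)) E')
      (pvMset (List.replicate (N + 1) (List.replicate (N + 1) (0 : Int))) 0 0 1)) := by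
  induction m with
  | zero => exact pvGood_init N
  | succ m ih =>
      rw [List.range'_concat, List.foldl_append]
      have e : (1 : Nat) + 1 * m = m + 1 := by omega
      rw [e]
      simp only [List.foldl_cons, List.foldl_nil]
      exact pvInner N (m + 1) (by omega) hm _ (by simpa using ih (by omega))

-- A's returned value, in terms of Ent
theorem pvA_eq (N : Nat) :
    PySem.Int.mod (pvMget ((List.range' 1 N).foldl (fun E i =>
        let E' := pvMset E i 0 0
        (List.range' 1 i).foldl (fun F j =>
          pvMset F i j
            (PySem.Int.mod (pvMget F i (j - 1) + pvMget F (i - 1) (i - j)) 1000000007)) E')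
      (pvMset (List.replicate (N + 1) (List.replicate (N + 1) (0 : Int))) 0 0 1)) N N) 1000000007
    = (Ent N N : Int) % 1000000007 := by
  obtain ⟨hL, hRL, hrows, _⟩ := pvOuter N N (le_refl N)
  have hrN := hrows N (le_refl N)
  have hm : ∀ (E : List (List Int)), E.getD N [] = pvRow N ++ List.replicate (N - N) 0 →
      pvMget E N N = (pvRow N).getD N 0 := by
    intro E hE
    unfold pvMget
    rw [hE, Nat.sub_self]
    simp
  rw [hm _ hrN, pvRow_ent N N le_rfl, pmod, modM_idem]

-- ---------- B-side: the fold computes the zigzag numbers mod p ----------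

theorem getD_map_range (f : Nat → Int) (n i : Nat) (h : i < n) :
    ((List.range n).map f).getD i 0 = f i := by
  rw [List.getD_eq_getElem _ _ (by simpa using h)]
  simp

-- the Pascal-row update of Source B produces the next binomial row mod p
theorem pvB_row (m : Nat) (row : List Int)
    (hrow : ∀ j, j ≤ m → row.getD j 0 = (m.choose j : Int) % 1000000007) :
    [(1 : Int)] ++ ((List.range m).map fun i =>
        PySem.Int.mod (row.getD i 0 + row.getD (i + 1) 0) 1000000007) ++ [(1 : Int)] =
      (List.range (m + 2)).map (fun j => ((m + 1).choose j : Int) % 1000000007) := by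
  rw [show m + 2 = (m + 1) + 1 from rfl, List.range_succ, List.map_append,
      List.range_succ_eq_map, List.map_cons, List.map_map]
  have hmid : ((List.range m).map fun i =>
      PySem.Int.mod (row.getD i 0 + row.getD (i + 1) 0) 1000000007) =
      (List.range m).map ((fun j => ((m + 1).choose j : Int) % 1000000007) ∘ Nat.succ) := by
    apply List.map_congr_left
    intro i hi
    rw [List.mem_range] at hi
    show PySem.Int.mod (row.getD i 0 + row.getD (i + 1) 0) 1000000007 =
      (((m + 1).choose (i + 1) : Int)) % 1000000007
    rw [hrow i (by omega), hrow (i + 1) (by omega), pmod, Nat.choose_succ_succ]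
    push_cast
    exact Int.ModEq.add (modM_idem _) (modM_idem _)
  rw [hmid]
  simp

-- the inner accumulation of Source B computes the binomial convolution mod p
theorem pvB_sum (m : Nat) (row z : List Int)
    (hrow : ∀ j, j ≤ m → row.getD j 0 = (m.choose j : Int) % 1000000007)
    (hz : ∀ j, j ≤ m → z.getD j 0 = (Ent j j : Int) % 1000000007) :
    (List.range (m + 1)).foldl (fun s j =>
        PySem.Int.mod (s + row.getD j 0 * z.getD j 0 * z.getD (m - j) 0) 1000000007) 0 =
      (∑ j ∈ Finset.range (m + 1),
        (m.choose j : Int) * Ent j j * Ent (m - j) (m - j)) % 1000000007 := by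
  suffices h : ∀ r, r ≤ m + 1 → (List.range r).foldl (fun s j =>
      PySem.Int.mod (s + row.getD j 0 * z.getD j 0 * z.getD (m - j) 0) 1000000007) 0 =
      (∑ j ∈ Finset.range r,
        (m.choose j : Int) * Ent j j * Ent (m - j) (m - j)) % 1000000007 from
    h (m + 1) le_rfl
  intro r
  induction r with
  | zero => intro _; simp
  | succ r ih =>
      intro hr
      rw [List.range_succ, List.foldl_append, List.foldl_cons, List.foldl_nil, ih (by omega),
          Finset.sum_range_succ, pmod, hrow r (by omega), hz r (by omega), hz (m - r) (by omega)]
      exact Int.ModEq.add (modM_idem _)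
        (Int.ModEq.mul (Int.ModEq.mul (modM_idem _) (modM_idem _)) (modM_idem _))

-- the halving step: multiplying by 500000004 halves an even residue mod the odd prime
theorem half_mod (E : Int) :
    PySem.Int.mod ((2 * E) % 1000000007 * 500000004) 1000000007 = E % 1000000007 := by
  rw [pmod]
  calc ((2 * E) % 1000000007 * 500000004) % 1000000007
      = ((2 * E) * 500000004) % 1000000007 := Int.ModEq.mul_right _ (modM_idem _)
    _ = (E + 1000000007 * E) % 1000000007 := by
        rw [show 2 * E * 500000004 = E + 1000000007 * E by ring]
    _ = E % 1000000007 := Int.add_mul_emod_self_left E 1000000007 E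

theorem pvB_inv (c : Nat) :
    (List.range' 1 c).foldl pvConvStep ([1, 1], [1]) =
      ((List.range (c + 2)).map (fun t => (Ent t t : Int) % 1000000007),
       (List.range (c + 1)).map (fun j => (c.choose j : Int) % 1000000007)) := by
  induction c with
  | zero =>
      have h11 : Ent 1 1 = 1 := by
        rw [show (1 : Nat) = 0 + 1 from rfl, ent_succ_succ, ent_base, ent_zero]
      simp [List.range_succ, ent_zero, h11]
  | succ c ih =>
      rw [List.range'_concat, List.foldl_append]
      rw [show (1 : Nat) + 1 * c = c + 1 by omega]
      simp only [List.foldl_cons, List.foldl_nil]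
      rw [ih]
      show pvConvStep _ (c + 1) = _
      unfold pvConvStep
      simp only []
      have hrow : ∀ j, j ≤ c →
          ((List.range (c + 1)).map (fun j => (c.choose j : Int) % 1000000007)).getD j 0 =
            (c.choose j : Int) % 1000000007 := by
        intro j hj; exact getD_map_range _ _ _ (by omega)
      have hz : ∀ j, j ≤ c + 1 →
          ((List.range (c + 2)).map (fun t => (Ent t t : Int) % 1000000007)).getD j 0 =
            (Ent j j : Int) % 1000000007 := by
        intro j hj; exact getD_map_range _ _ _ (by omega)
      have hrw : [(1 : Int)] ++ ((List.range (c + 1 - 1)).map fun i =>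
          PySem.Int.mod
            (((List.range (c + 1)).map (fun j => (c.choose j : Int) % 1000000007)).getD i 0 +
             ((List.range (c + 1)).map (fun j => (c.choose j : Int) % 1000000007)).getD (i + 1) 0)
            1000000007) ++ [(1 : Int)] =
          (List.range (c + 2)).map (fun j => ((c + 1).choose j : Int) % 1000000007) := by
        rw [show c + 1 - 1 = c from rfl]
        exact pvB_row c _ hrow
      rw [hrw]
      have hrow' : ∀ j, j ≤ c + 1 →
          ((List.range (c + 2)).map (fun j => ((c + 1).choose j : Int) % 1000000007)).getD j 0 =
            ((c + 1).choose j : Int) % 1000000007 := by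
        intro j hj; exact getD_map_range _ _ _ (by omega)
      rw [pvB_sum (c + 1) _ _ hrow' hz]
      have hconv : (∑ j ∈ Finset.range (c + 1 + 1),
          ((c + 1).choose j : Int) * Ent j j * Ent (c + 1 - j) (c + 1 - j)) =
          ((2 * Ent (c + 2) (c + 2) : Nat) : Int) := by
        rw [← conv_eq (c + 1) (by omega)]
        push_cast
        apply Finset.sum_congr rfl
        intro j _
        ring
      rw [hconv]
      have hinv : PySem.Int.floordiv (1000000007 + 1) 2 = 500000004 := by decide
      rw [hinv]
      push_cast
      rw [half_mod]
      have hzfin : (List.range (c + 1 + 2)).map (fun t => (Ent t t : Int) % 1000000007) =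
          (List.range (c + 2)).map (fun t => (Ent t t : Int) % 1000000007) ++
            [(Ent (c + 2) (c + 2) : Int) % 1000000007] := by
        rw [show c + 1 + 2 = (c + 2) + 1 from rfl, List.range_succ, List.map_append]
        rfl
      rw [hzfin]

-- ===== VERDICT (by name: the statement is the Claim_ definition above) =====
theorem numberOfZigZagArrays_spec : Claim_equal_numberOfZigZagArrays := by
  intro n k _
  unfold Spec_numberOfZigZagArrays numberOfZigZagArrays numberOfZigZagArrays_alt
  by_cases hn : n ≤ 0
  · rw [if_pos hn, if_pos hn]
  · rw [if_neg hn, if_neg hn]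
    have hN : 1 ≤ n.toNat := by omega
    have hB : PySem.Int.mod
        (((List.range' 1 (n.toNat - 1)).foldl pvConvStep ([1, 1], [1])).1.getD n.toNat 0)
        1000000007 = (Ent n.toNat n.toNat : Int) % 1000000007 := by
      rw [pvB_inv]
      show PySem.Int.mod (((List.range (n.toNat - 1 + 2)).map
        (fun t => (Ent t t : Int) % 1000000007)).getD n.toNat 0) 1000000007 = _
      rw [getD_map_range _ _ _ (by omega), pmod, modM_idem]
    exact (pvA_eq n.toNat).trans hB.symm
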